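-- pv_equiv track=rewrite | github.com/Savoie-Research-Group/yarp | yarp/sieve.py | smarts_to_tokens
-- ===== SOURCE A (Python) =====
-- valid_smiles_tokens = {'Br', 'C', 'Cl', 'H', 'B', 'N', 'O', 'P', 'S', 'F', 'I', 'b', 'c', 'n', 'o', 's', 'p', \
--                        '(', ')', '[', ']', '=', '#', '%', '1', '2', '3', '4', '5', '6', '7', '8', '9', '+', '-', \
--                        '0', '.', '/', '\\', '@', '@@', 'H', 'x', 'X', ':', '$', '*', \
--                        'K', 'V', 'Y', 'c', 'n', 'o', 's', 'p'}
--
-- def smarts_to_tokens(smarts):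
--     """
--     This is a helper function for `smarts_to_pattern()` that carries out the tokenization of the raw
--     smarts string in preparation for the pattern and path generation necessary for seiving yarpecules.
--
--     Parameters
--     ----------
--     smarts : str
--              The smarts pattern to be tokenized.
--     Returns
--     -------
--     tokens : list
--              The list containing the tokenized smarts pattern.
--     """
--     tokens = []
--     i = 0
--     while i < len(smarts):
--         if smarts[i:i+2] in valid_smiles_tokens:
--             tokens.append(smarts[i:i+2])
--             i += 2
--         elif smarts[i] in valid_smiles_tokens:
--             tokens.append(smarts[i])
--             i += 1
--         else:
--             raise ValueError('Invalid SMARTS token: ' + smarts[i])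
--     return tokens
-- ===== SOURCE B (Python) =====
-- _SINGLE_TOKENS = frozenset('CHBNOPSFIbcnosp()[]=#%1234567890+-./\\@xX:$*KVY')
--
-- def smarts_to_tokens(smarts):
--     tokens = []
--     stack = list(reversed(smarts))  # pop() from the end yields the characters in order
--     while stack:
--         c = stack.pop()
--         if stack and ((c == 'B' and stack[-1] == 'r') or
--                       (c == 'C' and stack[-1] == 'l') or
--                       (c == '@' and stack[-1] == '@')):
--             tokens.append(c + stack.pop())
--         elif c in _SINGLE_TOKENS:
--             tokens.append(c)
--         else:
--             raise ValueError('Invalid SMARTS token: ' + c)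
--     return tokens
-- ===== Notes on version B (the rewrite author's own statement) =====
-- stated objective: alternative
-- what changed: Replaces A's slice-and-set-membership greedy scan (testing smarts[i:i+2] against the whole token set) with a reversed-stack pop loop that matches the three two-char tokens Br/Cl/@@ by explicit character-pair tests and falls back to a single-character token set.
import Mathlib
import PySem

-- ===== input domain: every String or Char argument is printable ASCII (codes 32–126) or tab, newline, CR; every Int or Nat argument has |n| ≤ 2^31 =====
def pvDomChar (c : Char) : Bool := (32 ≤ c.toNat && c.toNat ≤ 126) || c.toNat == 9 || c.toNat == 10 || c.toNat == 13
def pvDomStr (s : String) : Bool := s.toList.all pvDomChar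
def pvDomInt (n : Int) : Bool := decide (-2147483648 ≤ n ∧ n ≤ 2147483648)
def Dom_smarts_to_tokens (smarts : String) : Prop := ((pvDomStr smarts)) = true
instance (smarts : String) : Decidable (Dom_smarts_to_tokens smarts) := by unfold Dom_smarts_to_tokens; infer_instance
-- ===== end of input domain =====

-- B replaces A's slice-plus-set-membership greedy scan by explicit two-char pair tests
-- (Br/Cl/@@) over a popped character stack with a single-char token set: an alternative
-- decomposition of the same tokenizer, equal wherever A returns (Pre_ excludes A's ValueError).

-- ===== PORT A =====
-- the set literal valid_smiles_tokens (distinct members, as a Python set of strings)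
def validSmilesTokens : List String :=
  ["Br", "C", "Cl", "H", "B", "N", "O", "P", "S", "F", "I", "b", "c", "n", "o", "s", "p",
   "(", ")", "[", "]", "=", "#", "%", "1", "2", "3", "4", "5", "6", "7", "8", "9", "+", "-",
   "0", ".", "/", "\\", "@", "@@", "x", "X", ":", "$", "*", "K", "V", "Y"]

-- A's while loop over index i, phrased on the suffix smarts[i:]; smarts[i:i+2] is take 2 of
-- the suffix, smarts[i] its head; the 'raise ValueError' branch is excluded by Pre_ (yields []).
def smartsLoopA : List Char → List String
  | [] => []
  | c :: rest =>
    if String.ofList (List.take 2 (c :: rest)) ∈ validSmilesTokens then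
      String.ofList (List.take 2 (c :: rest)) :: smartsLoopA (List.drop 1 rest)
    else if String.ofList [c] ∈ validSmilesTokens then
      String.ofList [c] :: smartsLoopA rest
    else []  -- raise ValueError (outside Pre_)
termination_by cs => cs.length
decreasing_by all_goals (simp; try omega)

def smarts_to_tokens (smarts : String) : List String :=
  smartsLoopA smarts.toList

-- ===== PORT B =====
-- _SINGLE_TOKENS of Source B
def singleTokens : List Char :=
  ['C', 'H', 'B', 'N', 'O', 'P', 'S', 'F', 'I', 'b', 'c', 'n', 'o', 's', 'p',
   '(', ')', '[', ']', '=', '#', '%', '1', '2', '3', '4', '5', '6', '7', '8', '9', '0',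
   '+', '-', '.', '/', '\\', '@', 'x', 'X', ':', '$', '*', 'K', 'V', 'Y']

-- Source B's while loop: the reversed stack popped from its end yields the characters in original
-- order, so the stack is the unconsumed character list (head = next pop); the 'raise
-- ValueError' branch is excluded by Pre_ (yields []).
def smartsLoopB : List Char → List String
  | [] => []
  | c :: stack =>
    match stack with
    | d :: stack' =>
      if (c = 'B' ∧ d = 'r') ∨ (c = 'C' ∧ d = 'l') ∨ (c = '@' ∧ d = '@') then
        String.ofList [c, d] :: smartsLoopB stack'
      else if c ∈ singleTokens then
        String.ofList [c] :: smartsLoopB (d :: stack')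
      else []  -- raise ValueError (outside Pre_)
    | [] =>
      if c ∈ singleTokens then [String.ofList [c]] else []
termination_by cs => cs.length
decreasing_by all_goals (simp; try omega)

def smarts_to_tokens_alt (smarts : String) : List String :=
  smartsLoopB smarts.toList

-- ===== PRECONDITION & SPEC =====
-- Pre_ excludes exactly the inputs on which A raises ValueError: A returns normally iff every
-- character is a single-char token or an 'r'/'l' immediately preceded by 'B'/'C'.
def Pre_smarts_to_tokens (smarts : String) : Prop :=
  ∀ i < smarts.toList.length,
    (smarts.toList.getD i ' ' ∈ singleTokens ∨ smarts.toList.getD i ' ' = 'r' ∨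
      smarts.toList.getD i ' ' = 'l') ∧
    (smarts.toList.getD i ' ' = 'r' → 0 < i ∧ smarts.toList.getD (i - 1) ' ' = 'B') ∧
    (smarts.toList.getD i ' ' = 'l' → 0 < i ∧ smarts.toList.getD (i - 1) ' ' = 'C')

instance (smarts : String) : Decidable (Pre_smarts_to_tokens smarts) := by
  unfold Pre_smarts_to_tokens; infer_instance

def pvWitness_smarts_to_tokens : String := "C1(Br)Cl@@"

def Spec_smarts_to_tokens (smarts : String) (out : List String) : Prop := out = smarts_to_tokens_alt smarts
instance (smarts : String) (out : List String) : Decidable (Spec_smarts_to_tokens smarts out) := by unfold Spec_smarts_to_tokens; infer_instance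

-- ===== CLAIM (what is proved, stated in full; the proofs are below) =====
def Claim_equal_smarts_to_tokens : Prop := ∀ (smarts : String), Dom_smarts_to_tokens smarts → Pre_smarts_to_tokens smarts → Spec_smarts_to_tokens smarts (smarts_to_tokens smarts)

-- ===== LEMMAS AND PROOFS =====

-- proof-only helper: the token set as character lists
def validTokenChars : List (List Char) :=
  [['B','r'], ['C'], ['C','l'], ['H'], ['B'], ['N'], ['O'], ['P'], ['S'], ['F'], ['I'],
   ['b'], ['c'], ['n'], ['o'], ['s'], ['p'], ['('], [')'], ['['], [']'], ['='], ['#'], ['%'],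
   ['1'], ['2'], ['3'], ['4'], ['5'], ['6'], ['7'], ['8'], ['9'], ['+'], ['-'], ['0'], ['.'],
   ['/'], ['\\'], ['@'], ['@','@'], ['x'], ['X'], [':'], ['$'], ['*'], ['K'], ['V'], ['Y']]

theorem map_toList : List.map String.toList validSmilesTokens = validTokenChars := by decide

theorem mem_ofList_iff (l : List Char) :
    (String.ofList l ∈ validSmilesTokens) ↔ l ∈ validTokenChars := by
  rw [← map_toList, List.mem_map]
  constructor
  · intro h; exact ⟨_, h, by rw [String.toList_ofList]⟩
  · rintro ⟨t, ht, rfl⟩; rwa [String.ofList_toList]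

-- a two-character string is in the token set iff it is one of Br, Cl, @@
theorem mem_two_iff (c d : Char) :
    (String.ofList [c, d] ∈ validSmilesTokens) ↔
      ((c = 'B' ∧ d = 'r') ∨ (c = 'C' ∧ d = 'l') ∨ (c = '@' ∧ d = '@')) := by
  rw [mem_ofList_iff]; simp [validTokenChars]

-- a one-character string is in the token set iff the character is a single-char token
set_option maxHeartbeats 4000000 in
theorem mem_one_iff (c : Char) :
    (String.ofList [c] ∈ validSmilesTokens) ↔ c ∈ singleTokens := by
  rw [mem_ofList_iff]; simp [validTokenChars, singleTokens]; tauto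

-- the two loops agree on every character list (on A's raise branch both return the
-- tokens accumulated so far)
theorem loops_eq (cs : List Char) : smartsLoopA cs = smartsLoopB cs := by
  match cs with
  | [] => simp [smartsLoopA, smartsLoopB]
  | [c] =>
    rw [smartsLoopA.eq_def, smartsLoopB.eq_def]
    by_cases h : c ∈ singleTokens <;>
      simp [List.take, mem_one_iff, h, smartsLoopA]
  | c :: d :: rest =>
    have ih1 := loops_eq rest
    have ih2 := loops_eq (d :: rest)
    rw [smartsLoopA.eq_def, smartsLoopB.eq_def]
    simp only [List.take, List.drop, mem_two_iff, mem_one_iff]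
    split_ifs <;> simp_all
termination_by cs.length

-- ===== VERDICT (by name: the statement is the Claim_ definition above) =====
theorem smarts_to_tokens_spec : Claim_equal_smarts_to_tokens := by
  intro smarts _ _
  unfold Spec_smarts_to_tokens smarts_to_tokens smarts_to_tokens_alt
  exact loops_eq smarts.toList
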